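-- pv_equiv track=rewrite | github.com/junjiejiangjjj/milvus-lite-v2 | tests/engine/test_insert_delete_insert.py | _expected_state
-- ===== SOURCE A (Python) =====
-- def _expected_state(ops):
--     """Compute the expected final visibility for X given a sequence of
--     ('insert', label) / ('delete',) ops applied in order."""
--     visible = None
--     for op in ops:
--         if op[0] == "insert":
--             visible = op[1]
--         else:
--             visible = None
--     return visible
-- ===== SOURCE B (Python) =====
-- def _expected_state(ops):
--     """Recursive: the outcome of the whole sequence equals the outcome of its
--     tail; a singleton sequence is decided by its own op (label iff insert)."""
--     if not ops:
--         return None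
--     rest = ops[1:]
--     if rest:
--         return _expected_state(rest)
--     op = ops[0]
--     head = op[:1]
--     if head and head[0] == "insert":
--         return op[1]
--     return None
-- ===== Notes on version B (the rewrite author's own statement) =====
-- stated objective: alternative
-- what changed: B recurses on the tail (earlier ops are irrelevant to the final state) and decides only the final op, testing it with an empty-safe slice instead of indexing, where A folds a visibility accumulator over every op.
import Mathlib
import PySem

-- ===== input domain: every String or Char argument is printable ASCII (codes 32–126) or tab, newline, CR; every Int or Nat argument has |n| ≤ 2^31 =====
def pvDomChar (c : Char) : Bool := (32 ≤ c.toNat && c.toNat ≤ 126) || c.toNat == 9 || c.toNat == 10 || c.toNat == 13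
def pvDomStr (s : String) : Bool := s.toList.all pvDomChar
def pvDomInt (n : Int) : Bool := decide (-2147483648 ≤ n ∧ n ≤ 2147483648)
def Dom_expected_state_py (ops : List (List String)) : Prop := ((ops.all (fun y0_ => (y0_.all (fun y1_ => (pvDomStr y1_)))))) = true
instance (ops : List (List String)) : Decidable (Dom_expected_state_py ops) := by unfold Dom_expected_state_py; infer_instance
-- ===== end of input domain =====

-- B recurses on the tail and decides only the final op with an empty-safe slice test (alternative decomposition).
-- ===== PORT A =====
-- visible = None; for op in ops: visible = op[1] if op[0]=="insert" else None; return visible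
def expected_state_py (ops : List (List String)) : Option String :=
  ops.foldl (fun _visible op =>
    if PySem.List.pyGet? op 0 = some "insert" then PySem.List.pyGet? op 1
    else none) none

-- ===== PORT B =====
-- if not ops: None; rest = ops[1:]; if rest: recurse on rest; else head = ops[0][:1]; label iff head nonempty with "insert"
def expected_state_py_alt : List (List String) → Option String
  | [] => none
  | op :: rest =>
      match rest with
      | [] =>
          let head := PySem.List.slice op none (some 1)
          if head ≠ [] ∧ head.headD "" = "insert" then PySem.List.pyGet? op 1
          else none
      | r :: rs => expected_state_py_alt (r :: rs)

-- ===== PRECONDITION & SPEC =====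
-- Pre_ excludes exactly the inputs on which A raises IndexError: an empty op
-- (op[0]) or an "insert" op without a label (op[1]).
def Pre_expected_state_py (ops : List (List String)) : Prop :=
  ∀ op ∈ ops, 1 ≤ op.length ∧ (PySem.List.pyGet? op 0 = some "insert" → 2 ≤ op.length)
instance (ops : List (List String)) : Decidable (Pre_expected_state_py ops) := by
  unfold Pre_expected_state_py; infer_instance
def pvWitness_expected_state_py : List (List String) := [["insert", "x"], ["delete"], ["insert", "y"]]
def Spec_expected_state_py (ops : List (List String)) (out : Option String) : Prop := out = expected_state_py_alt ops
instance (ops : List (List String)) (out : Option String) : Decidable (Spec_expected_state_py ops out) := by unfold Spec_expected_state_py; infer_instance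

-- ===== CLAIM =====
def Claim_equal_expected_state_py : Prop := ∀ (ops : List (List String)), Dom_expected_state_py ops → Pre_expected_state_py ops → Spec_expected_state_py ops (expected_state_py ops)

-- ===== LEMMAS AND PROOFS =====
-- A's step function ignores its accumulator, so the fold over a nonempty list
-- does not depend on the initial value.
theorem foldl_ignore_acc (f : List String → Option String) (x y : Option String)
    (l : List (List String)) (h : l ≠ []) :
    l.foldl (fun _ op => f op) x = l.foldl (fun _ op => f op) y := by
  cases l with
  | nil => exact absurd rfl h
  | cons a t => simp [List.foldl]

theorem expected_state_main (ops : List (List String))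
    (hpre : Pre_expected_state_py ops) :
    expected_state_py ops = expected_state_py_alt ops := by
  induction ops with
  | nil => rfl
  | cons op rest ih =>
      cases rest with
      | nil =>
          obtain ⟨h1, h2⟩ := hpre op (by simp)
          match op, h1 with
          | a :: t, _ =>
            simp [expected_state_py, expected_state_py_alt, List.foldl,
              PySem.List.slice, PySem.List.pyGet?, PySem.List.pyIdx?]
      | cons r rs =>
          have hrest : Pre_expected_state_py (r :: rs) := by
            intro o ho; exact hpre o (List.mem_cons_of_mem _ ho)
          have ihr := ih hrest
          show (op :: r :: rs).foldl _ none = _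
          rw [List.foldl_cons]
          rw [foldl_ignore_acc (fun op => if PySem.List.pyGet? op 0 = some "insert" then PySem.List.pyGet? op 1 else none) _ none (r :: rs) (by simp)]
          exact ihr

theorem expected_state_py_spec : Claim_equal_expected_state_py :=
  fun ops _ hpre => expected_state_main ops hpre
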